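-- pv_equiv track=rewrite | github.com/xRetr00/J.A.R.V.I.S | tools/agent_helper_kit/common.py | classify_verdict
-- ===== SOURCE A (Python) =====
-- from typing import Any, Dict, List, Optional, Tuple
--
-- def classify_verdict(findings: List[Dict[str, Any]]) -> str:
--     has_blocking = any(item.get("severity") == "blocking" for item in findings)
--     if has_blocking:
--         return "FAIL"
--     has_warning = any(item.get("severity") == "warning" for item in findings)
--     if has_warning:
--         return "PASS WITH ISSUES"
--     return "PASS"
-- ===== SOURCE B (Python) =====
-- def classify_verdict(findings):
--     has_warning = False
--     for item in findings:
--         sev = item.get("severity")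
--         if sev == "blocking":
--             return "FAIL"
--         if sev == "warning":
--             has_warning = True
--     return "PASS WITH ISSUES" if has_warning else "PASS"
-- ===== Notes on version B (the rewrite author's own statement) =====
-- stated objective: simpler
-- what changed: replaces A's two separate any-scans over all findings with a single pass that returns FAIL on the first blocking severity and carries a warning flag to the end
import Mathlib
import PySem

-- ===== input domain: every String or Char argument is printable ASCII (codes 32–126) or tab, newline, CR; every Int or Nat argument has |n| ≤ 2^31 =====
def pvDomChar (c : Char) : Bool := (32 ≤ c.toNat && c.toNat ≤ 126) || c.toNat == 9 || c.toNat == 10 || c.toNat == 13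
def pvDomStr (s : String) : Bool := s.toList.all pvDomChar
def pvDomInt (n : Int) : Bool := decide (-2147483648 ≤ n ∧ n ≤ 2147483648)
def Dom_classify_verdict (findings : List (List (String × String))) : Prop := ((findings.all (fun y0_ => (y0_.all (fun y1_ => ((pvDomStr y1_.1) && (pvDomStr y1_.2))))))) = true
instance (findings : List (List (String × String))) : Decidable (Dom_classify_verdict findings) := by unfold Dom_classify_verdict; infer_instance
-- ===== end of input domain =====

-- B replaces A's two any()-scans with one single-pass loop (early "FAIL", warning flag); same cost, simpler.


-- ===== PORT A =====
-- any(item.get("severity") == "blocking" ...), then any(... == "warning")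
def classify_verdict (findings : List (List (String × String))) : String :=
  let has_blocking := findings.any (fun item => (PySem.Dict.mk item).get? "severity" == some "blocking")
  if has_blocking then "FAIL"
  else
    let has_warning := findings.any (fun item => (PySem.Dict.mk item).get? "severity" == some "warning")
    if has_warning then "PASS WITH ISSUES" else "PASS"

-- ===== PORT B =====
-- single pass: early return "FAIL" on blocking, carry a warning flag
def classifyLoop : List (List (String × String)) → Bool → String
  | [], has_warning => if has_warning then "PASS WITH ISSUES" else "PASS"
  | item :: rest, has_warning =>
    let sev := (PySem.Dict.mk item).get? "severity"
    if sev == some "blocking" then "FAIL"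
    else classifyLoop rest (has_warning || sev == some "warning")

def classify_verdict_alt (findings : List (List (String × String))) : String :=
  classifyLoop findings false

-- ===== PRECONDITION & SPEC =====
def Spec_classify_verdict (findings : List (List (String × String))) (out : String) : Prop := out = classify_verdict_alt findings
instance (findings : List (List (String × String))) (out : String) : Decidable (Spec_classify_verdict findings out) := by unfold Spec_classify_verdict; infer_instance

-- ===== CLAIM (what is proved, stated in full; the proofs are below) =====
def Claim_equal_classify_verdict : Prop := ∀ (findings : List (List (String × String))), Dom_classify_verdict findings → Spec_classify_verdict findings (classify_verdict findings)

-- ===== LEMMAS AND PROOFS =====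

-- ===== VERDICT (by name: the statement is the Claim_ definition above) =====
lemma classifyLoop_char (findings : List (List (String × String))) (w : Bool) :
    classifyLoop findings w =
      (if findings.any (fun item => (PySem.Dict.mk item).get? "severity" == some "blocking") then "FAIL"
       else if w || findings.any (fun item => (PySem.Dict.mk item).get? "severity" == some "warning")
         then "PASS WITH ISSUES" else "PASS") := by
  induction findings generalizing w with
  | nil => simp [classifyLoop]
  | cons item rest ih =>
    simp only [classifyLoop, List.any_cons]
    by_cases hb : ((PySem.Dict.mk item).get? "severity" == some "blocking") = true
    · simp [hb]
    · simp only [Bool.not_eq_true] at hb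
      rw [ih]
      simp [hb, Bool.or_assoc]

theorem classify_verdict_spec : Claim_equal_classify_verdict := by
  intro findings _
  unfold Spec_classify_verdict classify_verdict classify_verdict_alt
  rw [classifyLoop_char]
  simp
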